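-- pv_equiv track=rewrite | github.com/YQ-7/CodeInterviewGuide | c5_string/is_scramble_str.py | same_type_same_number
-- ===== SOURCE A (Python) =====
-- def same_type_same_number(s1, s2):
--     """
--         判断s1、s2字符个数是否一致
--     """
--     if len(s1) != len(s2):
--         return False
--     m = {}
--     for c in s1:
--         m[c] = m.get(c, 0) + 1
--     for c in s2:
--         m[c] = m.get(c, 0) - 1
--         if m[c] < 0:
--             return False
--     return True
-- ===== SOURCE B (Python) =====
-- def same_type_same_number(s1, s2):
--     """
--         判断s1、s2字符个数是否一致
--     """
--     return sorted(s1) == sorted(s2)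
-- ===== Notes on version B (the rewrite author's own statement) =====
-- stated objective: idiomatic
-- what changed: Replaces the length guard plus two dict counting loops (increment over s1, decrement-with-early-exit over s2) by a single sort-based anagram check: sorted(s1) == sorted(s2).
import Mathlib
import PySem

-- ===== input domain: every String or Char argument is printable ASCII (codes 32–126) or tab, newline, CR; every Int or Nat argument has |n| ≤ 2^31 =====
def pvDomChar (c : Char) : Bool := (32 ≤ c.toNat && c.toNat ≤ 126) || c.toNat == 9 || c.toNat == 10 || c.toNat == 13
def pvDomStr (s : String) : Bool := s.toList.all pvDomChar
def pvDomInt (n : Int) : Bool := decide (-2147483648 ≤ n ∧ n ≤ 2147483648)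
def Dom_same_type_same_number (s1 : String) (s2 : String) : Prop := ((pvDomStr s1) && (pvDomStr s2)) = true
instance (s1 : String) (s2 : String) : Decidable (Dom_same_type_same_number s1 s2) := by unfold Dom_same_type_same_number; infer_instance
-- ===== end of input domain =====

-- B replaces A's two dict-counting loops (with early exit) by sorting both strings and
-- comparing the sorted character lists (idiomatic anagram check); not claimed faster.

-- ===== PORT A =====
-- second loop of A: m[c] = m.get(c, 0) - 1 for each char of s2, return False as soon as one goes negative
def pvALoop : List Char → PySem.Dict Char Int → Bool
  | [], _ => true
  | c :: rest, m =>
    if (m.insert c (m.getD c 0 - 1)).getD c 0 < 0 then false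
    else pvALoop rest (m.insert c (m.getD c 0 - 1))

def same_type_same_number (s1 : String) (s2 : String) : Bool :=
  if PySem.Str.len s1 ≠ PySem.Str.len s2 then false
  else
    -- first loop: m[c] = m.get(c, 0) + 1 over s1
    pvALoop s2.toList
      (s1.toList.foldl (fun m c => m.insert c (m.getD c 0 + 1)) PySem.Dict.empty)

-- ===== PORT B =====
def same_type_same_number_alt (s1 : String) (s2 : String) : Bool :=
  PySem.List.sorted s1.toList (fun c => c) false == PySem.List.sorted s2.toList (fun c => c) false

-- ===== PRECONDITION & SPEC =====
def Spec_same_type_same_number (s1 : String) (s2 : String) (out : Bool) : Prop := out = same_type_same_number_alt s1 s2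
instance (s1 : String) (s2 : String) (out : Bool) : Decidable (Spec_same_type_same_number s1 s2 out) := by unfold Spec_same_type_same_number; infer_instance

-- ===== CLAIM (what is proved, stated in full; the proofs are below) =====
def Claim_equal_same_type_same_number : Prop := ∀ (s1 : String) (s2 : String), Dom_same_type_same_number s1 s2 → Spec_same_type_same_number s1 s2 (same_type_same_number s1 s2)

-- ===== LEMMAS AND PROOFS =====

theorem pv_empty_getD (c : Char) : (PySem.Dict.empty : PySem.Dict Char Int).getD c 0 = 0 := rfl

-- the counter that A's first loop builds: getD is the character count of s1
theorem pv_getD_countFold (cs : List Char) (m : PySem.Dict Char Int) (c : Char) :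
    (cs.foldl (fun m c => m.insert c (m.getD c 0 + 1)) m).getD c 0
      = m.getD c 0 + (cs.count c : Int) := by
  induction cs generalizing m with
  | nil => simp
  | cons d rest ih =>
    rw [List.foldl_cons, ih, PySem.Dict.getD_insert]
    by_cases h : c = d
    · subst h
      rw [if_pos rfl, List.count_cons_self]
      push_cast
      ring
    · rw [if_neg h, List.count_cons_of_ne (Ne.symm h)]

-- A's second loop succeeds iff no char of s2 occurs more often than the counter allows
theorem pv_loop_iff (cs : List Char) (m : PySem.Dict Char Int) :
    pvALoop cs m = true ↔ ∀ c ∈ cs, (cs.count c : Int) ≤ m.getD c 0 := by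
  induction cs generalizing m with
  | nil => simp [pvALoop]
  | cons d rest ih =>
    have hins : (m.insert d (m.getD d 0 - 1)).getD d 0 = m.getD d 0 - 1 := by
      rw [PySem.Dict.getD_insert, if_pos rfl]
    rw [show pvALoop (d :: rest) m
        = (if (m.insert d (m.getD d 0 - 1)).getD d 0 < 0 then false
           else pvALoop rest (m.insert d (m.getD d 0 - 1))) from rfl, hins]
    by_cases hneg : m.getD d 0 - 1 < 0
    · rw [if_pos hneg]
      simp only [Bool.false_eq_true, false_iff]
      intro h
      have h1 := h d List.mem_cons_self
      rw [List.count_cons_self] at h1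
      have h0 : (0 : Int) ≤ (rest.count d : Int) := Int.natCast_nonneg _
      omega
    · rw [if_neg hneg, ih]
      constructor
      · intro h c hc
        rcases List.mem_cons.mp hc with rfl | hc'
        · rw [List.count_cons_self]
          by_cases hm : c ∈ rest
          · have h1 := h c hm
            rw [PySem.Dict.getD_insert, if_pos rfl] at h1
            omega
          · rw [List.count_eq_zero_of_not_mem hm]
            omega
        · by_cases hcd : c = d
          · subst hcd
            have h1 := h c hc'
            rw [PySem.Dict.getD_insert, if_pos rfl] at h1
            rw [List.count_cons_self]
            omega
          · have h1 := h c hc'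
            rw [PySem.Dict.getD_insert, if_neg hcd] at h1
            rw [List.count_cons_of_ne (Ne.symm hcd)]
            exact h1
      · intro h c hc
        have h1 := h c (List.mem_cons_of_mem d hc)
        rw [PySem.Dict.getD_insert]
        by_cases hcd : c = d
        · subst hcd
          rw [List.count_cons_self] at h1
          rw [if_pos rfl]
          omega
        · rw [List.count_cons_of_ne (Ne.symm hcd)] at h1
          rw [if_neg hcd]
          exact h1

theorem pv_A_iff_perm (s1 s2 : String) :
    same_type_same_number s1 s2 = true ↔ s1.toList.Perm s2.toList := by
  unfold same_type_same_number
  by_cases hlen : PySem.Str.len s1 ≠ PySem.Str.len s2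
  · rw [if_pos hlen]
    simp only [Bool.false_eq_true, false_iff]
    intro hp
    exact hlen (by simp [PySem.Str.len_eq, hp.length_eq])
  · rw [if_neg hlen]
    have hleq := not_ne_iff.mp hlen
    have hlen' : s1.toList.length = s2.toList.length := by
      simpa [PySem.Str.len_eq, Nat.cast_inj] using hleq
    rw [pv_loop_iff]
    constructor
    · intro h
      have hle : (↑s2.toList : Multiset Char) ≤ ↑s1.toList := by
        rw [Multiset.le_iff_count]
        intro a
        rw [Multiset.coe_count, Multiset.coe_count]
        by_cases ha : a ∈ s2.toList
        · have h2 := h a ha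
          rw [pv_getD_countFold, pv_empty_getD, zero_add] at h2
          exact_mod_cast h2
        · rw [List.count_eq_zero_of_not_mem ha]
          exact Nat.zero_le _
      have hcard : (↑s1.toList : Multiset Char).card ≤ (↑s2.toList : Multiset Char).card := by
        simp [hlen']
      exact Multiset.coe_eq_coe.mp (Multiset.eq_of_le_of_card_le hle hcard).symm
    · intro hp c _
      rw [pv_getD_countFold, pv_empty_getD, zero_add, hp.count_eq]

theorem pv_B_iff_perm (s1 s2 : String) :
    same_type_same_number_alt s1 s2 = true ↔ s1.toList.Perm s2.toList := by
  unfold same_type_same_number_alt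
  rw [beq_iff_eq]
  constructor
  · intro h
    have p1 := PySem.List.sorted_perm s1.toList (fun c => c) false
    have p2 := PySem.List.sorted_perm s2.toList (fun c => c) false
    exact p1.symm.trans (h ▸ p2)
  · intro hp
    have p1 := PySem.List.sorted_perm s1.toList (fun c => c) false
    have p2 := PySem.List.sorted_perm s2.toList (fun c => c) false
    exact List.Perm.eq_of_pairwise (fun a b _ _ h1 h2 => le_antisymm h1 h2)
      (PySem.List.sorted_pairwise s1.toList (fun c => c))
      (PySem.List.sorted_pairwise s2.toList (fun c => c))
      (p1.trans (hp.trans p2.symm))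

-- ===== VERDICT (by name: the statement is the Claim_ definition above) =====
theorem same_type_same_number_spec : Claim_equal_same_type_same_number := by
  intro s1 s2 _
  unfold Spec_same_type_same_number
  rw [Bool.eq_iff_iff, pv_A_iff_perm, pv_B_iff_perm]
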